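-- pv_equiv track=rewrite | github.com/michaelcrichlow/2024_11_08---SumOfOddSubArr | test_03.py | sumOddLengthContiguousSubsequence
-- ===== SOURCE A (Python) =====
-- from copy import deepcopy
--
-- def sumOddLengthContiguousSubsequence(l: list[int]) -> int:
--     # guard clause
--     if len(l) == 1:
--         return l[0]
--
--     _l = deepcopy(l)
--     _l.sort()
--     local_array: list[int] = []
--     total = 0
--
--     for i in range(1, len(_l)):
--         if _l[i - 1] == _l[i] - 1:
--             if len(local_array) == 0:
--                 local_array.append(_l[i - 1])
--                 local_array.append(_l[i])
--                 continue
--             else: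
--                 local_array.append(_l[i])
--                 continue
--
--         if len(local_array) != 0:
--             if len(local_array) % 2 != 0:
--                 total += sum(local_array)
--
--             local_array.clear()
--
--     if len(local_array) != 0:
--         if len(local_array) % 2 != 0:
--             total += sum(local_array)
--
--     return total
-- ===== SOURCE B (Python) =====
-- def sumOddLengthContiguousSubsequence(l: list[int]) -> int:
--     # guard clause
--     if len(l) == 1:
--         return l[0]
--
--     s = sorted(l)
--     n = len(s)
--     # phase 1: boundaries of the maximal runs of consecutive integers
--     cuts = [0] + [i for i in range(1, n) if s[i] - s[i - 1] != 1] + [n]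
--     # phase 2: each run [b:e) contributes its arithmetic-series sum when its
--     # length is odd and greater than 1
--     total = 0
--     for j in range(1, len(cuts)):
--         b, e = cuts[j - 1], cuts[j]
--         k = e - b
--         if k > 1 and k % 2 == 1:
--             total += k * s[b] + k * (k - 1) // 2
--     return total
-- ===== Notes on version B (the rewrite author's own statement) =====
-- stated objective: alternative
-- what changed: A makes one stateful scan that materializes each run of consecutive integers in a growing list, sums it and handles a duplicated end-of-loop flush; B instead computes the run boundaries in one comprehension and then folds over adjacent boundary pairs, adding each odd-length (>1) run via the arithmetic-series closed form k*s[b] + k*(k-1)//2 without ever materializing a run.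
import Mathlib
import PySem

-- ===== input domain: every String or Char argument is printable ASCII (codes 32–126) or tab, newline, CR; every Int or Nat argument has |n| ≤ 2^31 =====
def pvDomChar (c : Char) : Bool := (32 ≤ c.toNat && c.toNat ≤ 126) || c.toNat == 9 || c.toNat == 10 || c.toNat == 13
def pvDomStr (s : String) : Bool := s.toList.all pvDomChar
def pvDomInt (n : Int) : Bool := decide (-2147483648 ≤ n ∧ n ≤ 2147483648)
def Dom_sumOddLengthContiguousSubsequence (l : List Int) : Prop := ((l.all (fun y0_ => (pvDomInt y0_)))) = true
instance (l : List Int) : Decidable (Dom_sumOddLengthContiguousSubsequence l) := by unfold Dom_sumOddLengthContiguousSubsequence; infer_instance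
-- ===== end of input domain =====

-- B replaces A's single stateful scan that materializes each run in a list by a two-phase
-- computation (collect run boundaries, then fold over adjacent boundary pairs using the
-- arithmetic-series closed form); same asymptotic cost, alternative algorithmic decomposition.

-- ===== PORT A =====
-- literal transliteration of A: sort a copy, scan indices 1..n-1 carrying (local_array, total),
-- flush a run when the consecutive chain breaks, and once more after the loop.
def sumOddLengthContiguousSubsequence (l : List Int) : Int :=
  if l.length = 1 then (PySem.List.pyGetD l 0 0)
  else
    let s := PySem.List.sorted l (fun x => x) false
    let st := (PySem.List.pyRange 1 (s.length : Int) 1).foldl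
      (fun (st : List Int × Int) i =>
        if PySem.List.pyGetD s (i - 1) 0 = PySem.List.pyGetD s i 0 - 1 then
          (if st.1.length = 0 then [PySem.List.pyGetD s (i - 1) 0, PySem.List.pyGetD s i 0]
           else st.1 ++ [PySem.List.pyGetD s i 0], st.2)
        else
          if st.1.length ≠ 0 then
            (([] : List Int), if st.1.length % 2 ≠ 0 then st.2 + st.1.sum else st.2)
          else st) (([] : List Int), (0 : Int))
    if st.1.length ≠ 0 then
      (if st.1.length % 2 ≠ 0 then st.2 + st.1.sum else st.2)
    else st.2

-- ===== PORT B =====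
-- literal transliteration of Source B: boundary list 'cuts', then a fold over adjacent boundary
-- pairs adding the closed-form run sum k*s[b] + k*(k-1)//2 for odd k > 1.
def sumOddLengthContiguousSubsequence_alt (l : List Int) : Int :=
  if l.length = 1 then (PySem.List.pyGetD l 0 0)
  else
    let s := PySem.List.sorted l (fun x => x) false
    let n : Int := s.length
    let cuts : List Int :=
      [0] ++ ((PySem.List.pyRange 1 n 1).filter
                (fun i => PySem.List.pyGetD s i 0 - PySem.List.pyGetD s (i - 1) 0 != 1)) ++ [n]
    (PySem.List.pyRange 1 (cuts.length : Int) 1).foldl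
      (fun tot j =>
        let b := PySem.List.pyGetD cuts (j - 1) 0
        let e := PySem.List.pyGetD cuts j 0
        let k := e - b
        if k > 1 ∧ PySem.Int.mod k 2 = 1 then
          tot + (k * PySem.List.pyGetD s b 0 + PySem.Int.floordiv (k * (k - 1)) 2)
        else tot) 0

-- ===== PRECONDITION & SPEC =====
def Spec_sumOddLengthContiguousSubsequence (l : List Int) (out : Int) : Prop := out = sumOddLengthContiguousSubsequence_alt l
instance (l : List Int) (out : Int) : Decidable (Spec_sumOddLengthContiguousSubsequence l out) := by unfold Spec_sumOddLengthContiguousSubsequence; infer_instance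

-- ===== CLAIM (what is proved, stated in full; the proofs are below) =====
def Claim_equal_sumOddLengthContiguousSubsequence : Prop := ∀ (l : List Int), Dom_sumOddLengthContiguousSubsequence l → Spec_sumOddLengthContiguousSubsequence l (sumOddLengthContiguousSubsequence l)

-- ===== LEMMAS AND PROOFS =====

-- A's loop step, on the pair (s[i-1], s[i]).
def pvAStep (st : List Int × Int) (p : Int × Int) : List Int × Int :=
  if p.1 = p.2 - 1 then
    (if st.1.length = 0 then [p.1, p.2] else st.1 ++ [p.2], st.2)
  else
    if st.1.length ≠ 0 then
      (([] : List Int), if st.1.length % 2 ≠ 0 then st.2 + st.1.sum else st.2)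
    else st

def pvAFlush (st : List Int × Int) : Int :=
  if st.1.length ≠ 0 then
    (if st.1.length % 2 ≠ 0 then st.2 + st.1.sum else st.2)
  else st.2

def pvACore (s : List Int) : Int :=
  pvAFlush ((s.zip s.tail).foldl pvAStep (([] : List Int), (0 : Int)))

-- B's loop step, on the pair (cuts[j-1], cuts[j]).
def pvBStep (s : List Int) (tot : Int) (p : Int × Int) : Int :=
  let k := p.2 - p.1
  if k > 1 ∧ PySem.Int.mod k 2 = 1 then
    tot + (k * PySem.List.pyGetD s p.1 0 + PySem.Int.floordiv (k * (k - 1)) 2)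
  else tot

def pvCuts (s : List Int) : List Int :=
  [0] ++ ((PySem.List.pyRange 1 (s.length : Int) 1).filter
            (fun i => PySem.List.pyGetD s i 0 - PySem.List.pyGetD s (i - 1) 0 != 1)) ++ [(s.length : Int)]

def pvBCore (s : List Int) : Int :=
  ((pvCuts s).zip (pvCuts s).tail).foldl (pvBStep s) 0

-- the contribution of one maximal run
def pvClose (r : List Int) : Int :=
  if 2 ≤ r.length ∧ r.length % 2 = 1 then r.sum else 0

-- the maximal runs of consecutive integers: cur is the current run, p its last element
def pvRuns (cur : List Int) (p : Int) : List Int → List (List Int)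
  | [] => [cur]
  | x :: xs => if p = x - 1 then pvRuns (cur ++ [x]) x xs else cur :: pvRuns [x] x xs

-- adjacent-pair view of an index loop 'for i in range(1, len(xs)): … xs[i-1] … xs[i] …'
lemma pvZipAdj {α : Type} (xs : List α) (d : α) :
    (List.range (xs.length - 1)).map (fun k => (xs.getD k d, xs.getD (k + 1) d)) = xs.zip xs.tail := by
  match xs with
  | [] => rfl
  | [x] => rfl
  | x :: y :: t =>
    have ih := pvZipAdj (y :: t) d
    simp only [List.length_cons, Nat.add_sub_cancel] at ih ⊢
    rw [List.range_succ_eq_map, List.map_cons, List.map_map]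
    simp only [List.getD_cons_zero, List.getD_cons_succ, List.tail_cons, List.zip_cons_cons]
    congr 1

lemma pvAdjPairs {α : Type} (xs : List α) (d : α) :
    (PySem.List.pyRange 1 (xs.length : Int) 1).map
      (fun i => (PySem.List.pyGetD xs (i - 1) d, PySem.List.pyGetD xs i d)) = xs.zip xs.tail := by
  rw [PySem.List.pyRange_one, List.map_map]
  have h1 : (((xs.length : Int) - 1)).toNat = xs.length - 1 := by omega
  rw [h1, ← pvZipAdj xs d]
  apply List.map_congr_left
  intro k hk
  simp only [Function.comp_apply]
  have e1 : (1 : Int) + (k : Int) - 1 = ((k : Nat) : Int) := by omega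
  have e2 : (1 : Int) + (k : Int) = (((k + 1 : Nat)) : Int) := by omega
  rw [e1, e2, PySem.List.pyGetD_natCast, PySem.List.pyGetD_natCast]

-- the sum of the consecutive run a, a+1, …, a+k-1 (doubled, to stay division-free)
lemma pvSumRun (k : Nat) (a : Int) :
    2 * (PySem.List.pyRange a (a + k) 1).sum = 2 * (k * a) + k * (k - 1) := by
  induction k with
  | zero => simp [PySem.List.pyRange_one_eq_nil]
  | succ n ih =>
    have : a + ((n + 1 : Nat) : Int) = (a + n) + 1 := by push_cast; ring
    rw [this, PySem.List.pyRange_one_succ_right (by omega), List.sum_append]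
    simp only [List.sum_cons, List.sum_nil]
    push_cast
    push_cast at ih
    ring_nf
    ring_nf at ih
    omega

lemma pvLenRun (a : Int) (k : Nat) : (PySem.List.pyRange a (a + k) 1).length = k := by
  rw [PySem.List.length_pyRange_one]; omega

lemma pvRunSnoc (a : Int) (k : Nat) :
    PySem.List.pyRange a (a + (k : Int)) 1 ++ [a + k] = PySem.List.pyRange a (a + ((k + 1 : Nat) : Int)) 1 := by
  have : a + ((k + 1 : Nat) : Int) = (a + k) + 1 := by push_cast; ring
  rw [this, PySem.List.pyRange_one_succ_right (by omega)]

lemma pvRunTwo (a : Int) : PySem.List.pyRange a (a + ((2 : Nat) : Int)) 1 = [a, a + 1] := by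
  rw [PySem.List.pyRange_one_cons (by omega), PySem.List.pyRange_one_cons (by omega),
      PySem.List.pyRange_one_eq_nil (by omega)]

lemma pvRuns_nil (cur : List Int) (p : Int) : pvRuns cur p [] = [cur] := rfl

lemma pvRuns_cons (cur : List Int) (p x : Int) (xs : List Int) :
    pvRuns cur p (x :: xs) = if p = x - 1 then pvRuns (cur ++ [x]) x xs else cur :: pvRuns [x] x xs := rfl

lemma pvRunSum (k : Nat) (a : Int) :
    (PySem.List.pyRange a (a + (k : Int)) 1).sum
      = (k : Int) * a + PySem.Int.floordiv ((k : Int) * ((k : Int) - 1)) 2 := by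
  have h2 := pvSumRun k a
  rw [PySem.Int.floordiv_eq_ediv_of_pos (by omega)]
  have hm : (k : Int) * ((k : Int) - 1)
      = 2 * ((PySem.List.pyRange a (a + (k : Int)) 1).sum - (k : Int) * a) := by linarith
  rw [hm]
  rw [Int.mul_ediv_cancel_left _ (by omega : (2 : Int) ≠ 0)]
  ring

lemma pvBStepRun (s : List Int) (b k : Nat) (a tot : Int)
    (hget : s[b]? = some a) :
    pvBStep s tot ((b : Int), (b : Int) + (k : Int))
      = tot + pvClose (PySem.List.pyRange a (a + (k : Int)) 1) := by
  unfold pvBStep pvClose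
  simp only [pvLenRun]
  have hk' : (b : Int) + (k : Int) - (b : Int) = (k : Int) := by ring
  rw [hk']
  have hmod : PySem.Int.mod (k : Int) 2 = ((k % 2 : Nat) : Int) := by
    rw [PySem.Int.mod_eq_emod_of_pos (by omega)]
    push_cast
    omega
  have hgetD : PySem.List.pyGetD s ((b : Int)) 0 = a := by
    rw [PySem.List.pyGetD_natCast, List.getD_eq_getElem?_getD, hget]
    rfl
  rw [hgetD, hmod, pvRunSum k a]
  split_ifs <;> first | (exfalso; omega) | ring

lemma pvARun (rest : List Int) : ∀ (a : Int) (k : Nat) (tot : Int), 0 < k →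
    pvAFlush ((((a + k - 1) :: rest).zip rest).foldl pvAStep
        ((if 2 ≤ k then PySem.List.pyRange a (a + k) 1 else []), tot))
      = tot + ((pvRuns (PySem.List.pyRange a (a + k) 1) (a + k - 1) rest).map pvClose).sum := by
  induction rest with
  | nil =>
    intro a k tot hk
    simp only [List.zip_nil_right, List.foldl_nil, pvRuns_nil, List.map_cons, List.map_nil,
      List.sum_cons, List.sum_nil]
    by_cases h2 : 2 ≤ k
    · rw [if_pos h2]
      unfold pvAFlush pvClose
      simp only [pvLenRun]
      split_ifs <;> first | (exfalso; omega) | ring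
    · have hk1 : k = 1 := by omega
      subst hk1
      rw [if_neg h2]
      unfold pvAFlush pvClose
      simp only [pvLenRun]
      norm_num
  | cons x xs ih =>
    intro a k tot hk
    rw [List.zip_cons_cons, List.foldl_cons]
    by_cases hx : a + (k : Int) - 1 = x - 1
    · have hx' : x = a + k := by omega
      subst hx'
      have hstep : pvAStep ((if 2 ≤ k then PySem.List.pyRange a (a + k) 1 else []), tot)
          (a + (k : Int) - 1, a + k)
          = ((if 2 ≤ (k + 1) then PySem.List.pyRange a (a + ((k + 1 : Nat) : Int)) 1 else []), tot) := by
        rw [if_pos (by omega : 2 ≤ k + 1)]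
        by_cases h2 : 2 ≤ k
        · rw [if_pos h2]
          unfold pvAStep
          rw [if_pos hx]
          rw [if_neg (by rw [pvLenRun]; omega : ¬ (PySem.List.pyRange a (a + (k : Int)) 1).length = 0)]
          rw [pvRunSnoc]
        · have hk1 : k = 1 := by omega
          subst hk1
          rw [if_neg h2]
          unfold pvAStep
          rw [if_pos hx]
          simp only [List.length_nil]
          rw [pvRunTwo]
          norm_num
      rw [hstep]
      have hrec := ih a (k + 1) tot (by omega)
      have e1 : a + ((k + 1 : Nat) : Int) - 1 = a + k := by push_cast; ring
      rw [e1] at hrec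
      rw [hrec]
      rw [pvRuns_cons, if_pos hx, pvRunSnoc]
    · have hstep : pvAStep ((if 2 ≤ k then PySem.List.pyRange a (a + k) 1 else []), tot)
          (a + (k : Int) - 1, x)
          = (([] : List Int), tot + pvClose (PySem.List.pyRange a (a + k) 1)) := by
        by_cases h2 : 2 ≤ k
        · rw [if_pos h2]
          unfold pvAStep
          rw [if_neg hx]
          rw [if_pos (by rw [pvLenRun]; omega : (PySem.List.pyRange a (a + (k : Int)) 1).length ≠ 0)]
          unfold pvClose
          simp only [pvLenRun]
          by_cases ho : k % 2 = 1
          · rw [if_pos (by omega), if_pos ⟨h2, ho⟩]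
          · rw [if_neg (by omega), if_neg (by tauto)]
            norm_num
        · have hk1 : k = 1 := by omega
          subst hk1
          rw [if_neg h2]
          unfold pvAStep pvClose
          rw [if_neg hx]
          simp only [pvLenRun, List.length_nil]
          norm_num
      rw [hstep]
      have hrec := ih x 1 (tot + pvClose (PySem.List.pyRange a (a + k) 1)) (by omega)
      have e1 : x + ((1 : Nat) : Int) - 1 = x := by push_cast; ring
      rw [e1] at hrec
      rw [if_neg (by omega : ¬ (2 ≤ 1))] at hrec
      have e3 : x + ((1 : Nat) : Int) = x + 1 := by push_cast; ring
      rw [e3, PySem.List.pyRange_one_singleton] at hrec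
      rw [hrec]
      rw [pvRuns_cons, if_neg hx]
      simp only [List.map_cons, List.sum_cons]
      ring

lemma pvBRun (s : List Int) (rest : List Int) : ∀ (b k : Nat) (a tot : Int), 0 < k →
    List.drop b s = PySem.List.pyRange a (a + k) 1 ++ rest →
    b + k + rest.length = s.length →
    ((((b : Int) :: ((PySem.List.pyRange ((b : Int) + k) (s.length : Int) 1).filter
          (fun i => PySem.List.pyGetD s i 0 - PySem.List.pyGetD s (i - 1) 0 != 1) ++ [(s.length : Int)]))).zip
        ((PySem.List.pyRange ((b : Int) + k) (s.length : Int) 1).filter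
          (fun i => PySem.List.pyGetD s i 0 - PySem.List.pyGetD s (i - 1) 0 != 1) ++ [(s.length : Int)])).foldl
      (pvBStep s) tot
      = tot + ((pvRuns (PySem.List.pyRange a (a + k) 1) (a + k - 1) rest).map pvClose).sum := by
  induction rest with
  | nil =>
    intro b k a tot hk hdrop hlen
    have hn : ((s.length : Nat) : Int) = (b : Int) + (k : Int) := by
      simp at hlen; omega
    rw [hn, PySem.List.pyRange_one_eq_nil (by omega), List.filter_nil, List.nil_append]
    simp only [List.zip_cons_cons, List.zip_nil_right, List.foldl_cons, List.foldl_nil]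
    have hget : s[b]? = some a := by
      have h0 : (List.drop b s)[0]? = s[b]? := by
        rw [List.getElem?_drop, Nat.add_zero]
      rw [← h0, hdrop]
      rw [PySem.List.pyRange_one_cons (by omega)]
      rfl
    rw [pvBStepRun s b k a tot hget]
    rw [pvRuns_nil]
    simp
  | cons x xs ih =>
    intro b k a tot hk hdrop hlen
    have hbk : ((b : Int) + (k : Int)) < (s.length : Int) := by
      simp at hlen; omega
    rw [PySem.List.pyRange_one_cons hbk, List.filter_cons]
    -- evaluate the predicate at i = b + k
    have hgetx : s[b + k]? = some x := by
      have h0 : (List.drop b s)[k]? = s[b + k]? := by rw [List.getElem?_drop]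
      rw [← h0, hdrop, List.getElem?_append_right (by rw [pvLenRun])]
      rw [pvLenRun]
      simp
    have hgetp : s[b + k - 1]? = some (a + (k : Int) - 1) := by
      have h0 : (List.drop b s)[k - 1]? = s[b + (k - 1)]? := by rw [List.getElem?_drop]
      have e : b + (k - 1) = b + k - 1 := by omega
      rw [e] at h0
      rw [← h0, hdrop, List.getElem?_append_left (by rw [pvLenRun]; omega)]
      rw [PySem.List.getElem?_pyRange_one, if_pos (by omega : k - 1 < ((a + (k : Int)) - a).toNat)]
      congr 1
      omega
    have hgx : PySem.List.pyGetD s ((b : Int) + (k : Int)) 0 = x := by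
      have e : ((b : Int) + (k : Int)) = ((b + k : Nat) : Int) := by push_cast; ring
      rw [e, PySem.List.pyGetD_natCast, List.getD_eq_getElem?_getD, hgetx]
      rfl
    have hgp : PySem.List.pyGetD s ((b : Int) + (k : Int) - 1) 0 = a + (k : Int) - 1 := by
      have e : ((b : Int) + (k : Int) - 1) = ((b + k - 1 : Nat) : Int) := by omega
      rw [e, PySem.List.pyGetD_natCast, List.getD_eq_getElem?_getD, hgetp]
      rfl
    by_cases hx : x = a + (k : Int)
    · -- consecutive: the predicate is false, no cut here
      have hpred : (PySem.List.pyGetD s ((b : Int) + (k : Int)) 0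
          - PySem.List.pyGetD s ((b : Int) + (k : Int) - 1) 0 != 1) = false := by
        rw [hgx, hgp, hx]
        simp
      rw [hpred, if_neg (by simp)]
      have e1 : (b : Int) + (k : Int) + 1 = (b : Int) + ((k + 1 : Nat) : Int) := by push_cast; ring
      rw [e1]
      have hdrop' : List.drop b s = PySem.List.pyRange a (a + ((k + 1 : Nat) : Int)) 1 ++ xs := by
        rw [hdrop, ← pvRunSnoc, hx]
        simp
      have hrec := ih b (k + 1) a tot (by omega) hdrop' (by simp at hlen ⊢; omega)
      rw [hrec]
      rw [pvRuns_cons, if_pos (by omega : a + (k : Int) - 1 = x - 1), hx, pvRunSnoc]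
      have e2 : a + ((k + 1 : Nat) : Int) - 1 = a + (k : Int) := by push_cast; ring
      rw [e2]
    · -- a cut at b + k
      have hpred : (PySem.List.pyGetD s ((b : Int) + (k : Int)) 0
          - PySem.List.pyGetD s ((b : Int) + (k : Int) - 1) 0 != 1) = true := by
        rw [hgx, hgp]
        simp
        omega
      rw [hpred, if_pos rfl]
      simp only [List.cons_append, List.zip_cons_cons, List.foldl_cons]
      have hget : s[b]? = some a := by
        have h0 : (List.drop b s)[0]? = s[b]? := by rw [List.getElem?_drop, Nat.add_zero]
        rw [← h0, hdrop, List.getElem?_append_left (by rw [pvLenRun]; omega)]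
        rw [PySem.List.getElem?_pyRange_one, if_pos (by omega : 0 < ((a + (k : Int)) - a).toNat)]
        simp
      rw [pvBStepRun s b k a tot hget]
      have e1 : (b : Int) + (k : Int) = ((b + k : Nat) : Int) := by omega
      have e2 : ((b + k : Nat) : Int) + ((1 : Nat) : Int) = ((b + k : Nat) : Int) + 1 := by omega
      have hdrop' : List.drop (b + k) s = PySem.List.pyRange x (x + ((1 : Nat) : Int)) 1 ++ xs := by
        have hsplit : List.drop (b + k) s = List.drop k (List.drop b s) := by
          rw [List.drop_drop, Nat.add_comm]
        rw [hsplit, hdrop, List.drop_append_of_le_length (by rw [pvLenRun])]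
        rw [List.drop_of_length_le (by rw [pvLenRun])]
        have e : x + ((1 : Nat) : Int) = x + 1 := by push_cast; ring
        rw [e, PySem.List.pyRange_one_singleton]
        rfl
      have hrec := ih (b + k) 1 x (tot + pvClose (PySem.List.pyRange a (a + (k : Int)) 1)) (by omega)
        hdrop' (by simp at hlen ⊢; omega)
      rw [e1]
      rw [e2] at hrec
      have e4 : PySem.List.pyRange x (x + ((1 : Nat) : Int)) 1 = [x] := by
        have e : x + ((1 : Nat) : Int) = x + 1 := by push_cast; ring
        rw [e, PySem.List.pyRange_one_singleton]
      have e3 : x + ((1 : Nat) : Int) - 1 = x := by push_cast; ring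
      rw [e4, e3] at hrec
      rw [hrec]
      rw [pvRuns_cons, if_neg (by omega : ¬ (a + (k : Int) - 1 = x - 1))]
      simp only [List.map_cons, List.sum_cons]
      ring

lemma pvACore_eq_pvBCore (s : List Int) : pvACore s = pvBCore s := by
  match s with
  | [] => rfl
  | h :: t =>
    have e1 : h + ((1 : Nat) : Int) - 1 = h := by push_cast; ring
    have e4 : PySem.List.pyRange h (h + ((1 : Nat) : Int)) 1 = [h] := by
      have e : h + ((1 : Nat) : Int) = h + 1 := by push_cast; ring
      rw [e, PySem.List.pyRange_one_singleton]
    have hA := pvARun t h 1 0 (by omega)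
    rw [if_neg (by omega : ¬ (2 ≤ 1)), e1, e4] at hA
    have hdrop : List.drop 0 (h :: t) = PySem.List.pyRange h (h + ((1 : Nat) : Int)) 1 ++ t := by
      rw [List.drop_zero, e4]; rfl
    have hB := pvBRun (h :: t) t 0 1 h 0 (by omega) hdrop (by simp; omega)
    rw [e1, e4] at hB
    have gA : pvACore (h :: t) = 0 + ((pvRuns [h] h t).map pvClose).sum := by
      unfold pvACore
      simpa using hA
    have gB : pvBCore (h :: t) = 0 + ((pvRuns [h] h t).map pvClose).sum := by
      unfold pvBCore pvCuts
      have := hB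
      norm_num at this ⊢
      convert this using 2
    rw [gA, gB]


lemma pvPortA (l : List Int) :
    sumOddLengthContiguousSubsequence l =
      if l.length = 1 then (PySem.List.pyGetD l 0 0)
      else pvACore (PySem.List.sorted l (fun x => x) false) := by
  unfold sumOddLengthContiguousSubsequence
  by_cases h : l.length = 1
  · simp [h]
  · simp only [h, if_false]
    unfold pvACore
    rw [← pvAdjPairs (PySem.List.sorted l (fun x => x) false) 0, List.foldl_map]
    rfl

lemma pvPortB (l : List Int) :
    sumOddLengthContiguousSubsequence_alt l =
      if l.length = 1 then (PySem.List.pyGetD l 0 0)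
      else pvBCore (PySem.List.sorted l (fun x => x) false) := by
  unfold sumOddLengthContiguousSubsequence_alt
  by_cases h : l.length = 1
  · simp [h]
  · simp only [h, if_false]
    unfold pvBCore
    rw [← pvAdjPairs (pvCuts (PySem.List.sorted l (fun x => x) false)) 0, List.foldl_map]
    rfl

-- ===== VERDICT (by name: the statement is the Claim_ definition above) =====
theorem sumOddLengthContiguousSubsequence_spec : Claim_equal_sumOddLengthContiguousSubsequence := by
  intro l _
  unfold Spec_sumOddLengthContiguousSubsequence
  rw [pvPortA, pvPortB, pvACore_eq_pvBCore]
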